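-- pv_equiv track=rewrite | github.com/TheWhiteBug/pasaffe | pasaffe_lib/readdb.py | _field_to_folder_list
-- ===== SOURCE A (Python) =====
-- def _field_to_folder_list(field):
--     '''Converts a folder field to a folder list'''
--
--     # We need to split into folders using the "." character, but not
--     # if it is escaped with a \
--     folders = []
--
--     if field == "":
--         return folders
--
--     index = 0
--     location = 0
--
--     while index < len(field):
--
--         if field[index] == ".":
--             folders.append("")
--             location += 1
--             index += 1
--             continue
--
--         location = field.find(".", location + 1)
--
--         if location == -1:
--             break
--
--         if field[location - 1] == "\\":
--             continue
--
--         folders.append(field[index:location].replace("\\", ''))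
--         index = location + 1
--
--     folders.append(field[index:len(field)].replace('\\', ''))
--     return folders
-- ===== SOURCE B (Python) =====
-- def _field_to_folder_list(field):
--     '''Converts a folder field to a folder list'''
--     if field == "":
--         return []
--     folders = []
--     buf = []
--     for i, c in enumerate(field):
--         if c == "\\":
--             continue
--         if c == "." and (i == 0 or field[i - 1] != "\\"):
--             folders.append("".join(buf))
--             buf = []
--         else:
--             buf.append(c)
--     folders.append("".join(buf))
--     return folders
-- ===== Notes on version B (the rewrite author's own statement) =====
-- stated objective: simpler
-- what changed: A's index/location bookkeeping with repeated field.find scans and slicing is replaced by a single forward character scan that drops backslashes, splits on a dot whose predecessor is not a backslash, and otherwise extends the current buffer.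
import Mathlib
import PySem

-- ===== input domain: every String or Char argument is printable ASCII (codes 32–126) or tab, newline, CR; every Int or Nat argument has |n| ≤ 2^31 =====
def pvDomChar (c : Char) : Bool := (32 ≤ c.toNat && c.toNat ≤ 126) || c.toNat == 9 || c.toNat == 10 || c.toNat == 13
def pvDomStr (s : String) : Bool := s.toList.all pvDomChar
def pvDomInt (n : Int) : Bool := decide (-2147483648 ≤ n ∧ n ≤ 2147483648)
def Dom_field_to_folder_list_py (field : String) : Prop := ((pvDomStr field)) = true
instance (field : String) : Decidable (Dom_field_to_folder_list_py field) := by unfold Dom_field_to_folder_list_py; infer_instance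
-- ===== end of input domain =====

-- B replaces A's index/find-driven while loop by a single forward character scan (objective: simpler).

-- ===== PORT A =====
-- A's while loop over (index, location); fuel 2*len+2 is a termination guard only:
-- each iteration strictly increases index + location, both bounded by len, so it never runs out.
def pvLoopA (s : List Char) (fuel : Nat) (index location : Int)
    (folders : List (List Char)) : List (List Char) :=
  match fuel with
  | 0 => folders  -- unreachable with the fuel supplied below
  | f + 1 =>
    if index < (s.length : Int) then
      if PySem.List.pyGet? s index = some '.' then
        pvLoopA s f (index + 1) (location + 1) (folders ++ [[]])
      else
        let loc := PySem.Chars.findFrom s ['.'] (location + 1) none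
        if loc = -1 then
          folders ++ [PySem.Chars.replace (PySem.List.slice s (some index) (some (s.length : Int))) ['\\'] []]
        else if PySem.List.pyGet? s (loc - 1) = some '\\' then
          pvLoopA s f index loc folders
        else
          pvLoopA s f (loc + 1) loc
            (folders ++ [PySem.Chars.replace (PySem.List.slice s (some index) (some loc)) ['\\'] []])
    else
      folders ++ [PySem.Chars.replace (PySem.List.slice s (some index) (some (s.length : Int))) ['\\'] []]

def field_to_folder_list_py (field : String) : List String :=
  if field = "" then []
  else (pvLoopA field.toList (2 * field.toList.length + 2) 0 0 []).map String.ofList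

-- ===== PORT B =====
-- single forward scan: drop '\', split on '.' not preceded by '\', else extend the buffer
def pvScanB (cs : List Char) (prev : Option Char) (buf : List Char)
    (acc : List (List Char)) : List (List Char) :=
  match cs with
  | [] => acc ++ [buf]
  | c :: rest =>
    if c = '\\' then pvScanB rest (some c) buf acc
    else if c = '.' ∧ (prev = none ∨ prev ≠ some '\\') then
      pvScanB rest (some c) [] (acc ++ [buf])
    else pvScanB rest (some c) (buf ++ [c]) acc

def field_to_folder_list_py_alt (field : String) : List String :=
  if field = "" then []
  else (pvScanB field.toList none [] []).map String.ofList

-- ===== PRECONDITION & SPEC =====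
def Spec_field_to_folder_list_py (field : String) (out : List String) : Prop := out = field_to_folder_list_py_alt field
instance (field : String) (out : List String) : Decidable (Spec_field_to_folder_list_py field out) := by unfold Spec_field_to_folder_list_py; infer_instance

-- ===== CLAIM (what is proved, stated in full; the proofs are below) =====
def Claim_equal_field_to_folder_list_py : Prop := ∀ (field : String), Dom_field_to_folder_list_py field → Spec_field_to_folder_list_py field (field_to_folder_list_py field)

-- ===== LEMMAS AND PROOFS =====

-- The common specification: split on unescaped dots, dropping backslashes.
-- esc = "the previous character was a backslash".
def pvConsHead (c : Char) (l : List (List Char)) : List (List Char) :=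
  match l with
  | [] => [[c]]
  | h :: t => (c :: h) :: t

def pvSplitF (esc : Bool) : List Char → List (List Char)
  | [] => [[]]
  | c :: r =>
    if c = '\\' then pvSplitF true r
    else if c = '.' ∧ esc = false then [] :: pvSplitF false r
    else pvConsHead c (pvSplitF false r)

def pvAug (buf : List Char) (l : List (List Char)) : List (List Char) :=
  match l with
  | [] => [buf]
  | h :: t => (buf ++ h) :: t

theorem pvSplitF_ne_nil (esc : Bool) (t : List Char) : pvSplitF esc t ≠ [] := by
  induction t generalizing esc with
  | nil => simp [pvSplitF]
  | cons c r ih =>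
    simp only [pvSplitF]
    split_ifs with h1 h2
    · exact ih true
    · simp
    · unfold pvConsHead
      split <;> simp

-- B computes pvSplitF
theorem pvScanB_eq (t : List Char) : ∀ (prev : Option Char) (buf : List Char) (acc : List (List Char)),
    pvScanB t prev buf acc = acc ++ pvAug buf (pvSplitF (decide (prev = some '\\')) t) := by
  induction t with
  | nil => intro prev buf acc; simp [pvScanB, pvSplitF, pvAug]
  | cons c r ih =>
    intro prev buf acc
    simp only [pvScanB, pvSplitF]
    by_cases h1 : c = '\\'
    · subst h1
      rw [if_pos rfl, if_pos rfl, ih]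
      simp
    · rw [if_neg h1, if_neg h1]
      by_cases h2 : c = '.' ∧ (prev = none ∨ prev ≠ some '\\')
      · have hd : (c = '.' ∧ decide (prev = some '\\') = false) := by
          refine ⟨h2.1, ?_⟩
          rcases h2.2 with h | h <;> simp [h]
        rw [if_pos h2, if_pos hd, ih]
        cases hsp : pvSplitF false r with
        | nil => exact absurd hsp (pvSplitF_ne_nil false r)
        | cons a b => simp [pvAug, hd.1, hsp]
      · have hd : ¬ (c = '.' ∧ decide (prev = some '\\') = false) := by
          intro ⟨hc, hp⟩
          exact h2 ⟨hc, by simpa using Or.inr (by simpa using hp)⟩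
        rw [if_neg h2, if_neg hd, ih]
        cases hsp : pvSplitF false r with
        | nil => exact absurd hsp (pvSplitF_ne_nil false r)
        | cons a b => simp [pvAug, pvConsHead, h1, hsp]

-- replace(s, "\\", "") is filter
theorem pvGo_filter : ∀ (fuel : Nat) (cs acc : List Char), cs.length ≤ fuel →
    PySem.Chars.replace.go ['\\'] [] fuel cs acc = acc.reverse ++ cs.filter (· ≠ '\\') := by
  intro fuel
  induction fuel with
  | zero =>
    intro cs acc h
    have : cs = [] := List.eq_nil_of_length_eq_zero (by omega)
    subst this; simp [PySem.Chars.replace.go]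
  | succ f ih =>
    intro cs acc h
    match cs with
    | [] => simp [PySem.Chars.replace.go]
    | c :: t =>
      simp only [PySem.Chars.replace.go]
      by_cases hc : c = '\\'
      · subst hc
        have hp : List.isPrefixOf ['\\'] ('\\' :: t) = true := by simp [List.isPrefixOf]
        rw [if_pos hp]
        simp only [List.length_cons] at h
        simp only [List.length_singleton, List.drop_succ_cons, List.drop_zero, List.reverse_nil,
          List.nil_append]
        rw [ih t acc (by omega)]
        simp
      · have hp : List.isPrefixOf ['\\'] (c :: t) = false := by
          simp [List.isPrefixOf]; exact fun hh => absurd hh.symm hc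
        rw [if_neg (by simp [hp])]
        simp only [List.length_cons] at h
        rw [ih t (c :: acc) (by omega)]
        simp [hc]

theorem pvRepl_filter (cs : List Char) : PySem.Chars.replace cs ['\\'] [] = cs.filter (· ≠ '\\') := by
  simp [PySem.Chars.replace, pvGo_filter cs.length cs [] le_rfl]

-- pvSplitF on a chunk with no unescaped dot
theorem pvSplitF_no_dot (t : List Char) (esc : Bool)
    (h : ∀ j, t[j]? = some '.' → (j = 0 ∧ esc = true) ∨ (0 < j ∧ t[j-1]? = some '\\')) :
    pvSplitF esc t = [t.filter (· ≠ '\\')] := by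
  induction t generalizing esc with
  | nil => rfl
  | cons c r ih =>
    simp only [pvSplitF]
    split_ifs with h1 h2
    · subst h1
      rw [ih true ?_]
      · simp
      · intro j hdot
        rcases h (j+1) (by simpa using hdot) with ⟨hj0, _⟩ | ⟨hpos, hbs⟩
        · omega
        · rcases Nat.eq_zero_or_pos j with hz | hp
          · exact Or.inl ⟨hz, rfl⟩
          · refine Or.inr ⟨hp, ?_⟩
            have he : j + 1 - 1 = (j - 1) + 1 := by omega
            rw [he, List.getElem?_cons_succ] at hbs
            exact hbs
    · exfalso
      rcases h 0 (by simpa using h2.1) with ⟨_, he⟩ | ⟨hpos, _⟩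
      · rw [h2.2] at he; exact Bool.false_ne_true he
      · omega
    · rw [ih false ?_]
      · have hcne : c ≠ '\\' := h1
        simp [pvConsHead, hcne]
      · intro j hdot
        rcases h (j+1) (by simpa using hdot) with ⟨hj0, _⟩ | ⟨hpos, hbs⟩
        · omega
        · rcases Nat.eq_zero_or_pos j with hz | hp
          · subst hz
            simp at hbs
            exact absurd hbs h1
          · refine Or.inr ⟨hp, ?_⟩
            have he : j + 1 - 1 = (j - 1) + 1 := by omega
            rw [he, List.getElem?_cons_succ] at hbs
            exact hbs

-- pvSplitF decomposition at the first unescaped dot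
theorem pvSplitF_split (t : List Char) (esc : Bool) (k : Nat)
    (hdot : t[k]? = some '.')
    (hune : (k = 0 ∧ esc = false) ∨ (0 < k ∧ t[k-1]? ≠ some '\\'))
    (hmin : ∀ j, j < k → t[j]? = some '.' →
      (j = 0 ∧ esc = true) ∨ (0 < j ∧ t[j-1]? = some '\\')) :
    pvSplitF esc t = (t.take k).filter (· ≠ '\\') :: pvSplitF false (t.drop (k+1)) := by
  induction t generalizing esc k with
  | nil => simp at hdot
  | cons c r ih =>
    match k with
    | 0 =>
      simp only [List.getElem?_cons_zero, Option.some.injEq] at hdot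
      rcases hune with ⟨_, hesc⟩ | ⟨hpos, _⟩
      · subst hesc
        simp only [pvSplitF]
        rw [if_neg (by simp [hdot]), if_pos (by simp [hdot])]
        simp
      · omega
    | k + 1 =>
      simp only [List.getElem?_cons_succ] at hdot
      have hune' : (k = 0 ∧ esc = false) ∨ (0 < k + 1 ∧ (c :: r)[k]? ≠ some '\\') := by
        rcases hune with ⟨h0, _⟩ | h; · omega
        · exact Or.inr h
      simp only [pvSplitF]
      split_ifs with h1 h2
      · -- c = '\\'
        subst h1
        -- k = 0 impossible: hune says t[0] ≠ '\' but t[0] = '\'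
        match k with
        | 0 =>
          exfalso
          rcases hune with ⟨h0, _⟩ | ⟨_, hne⟩; · omega
          · exact hne (by simp)
        | k + 1 =>
          rw [ih true (k+1) hdot ?_ ?_]
          · simp
          · refine Or.inr ⟨by omega, ?_⟩
            rcases hune with ⟨h0, _⟩ | ⟨_, hne⟩; · omega
            · simpa using hne
          · intro j hj hdotj
            rcases hmin (j+1) (by omega) (by simpa using hdotj) with ⟨h0, _⟩ | ⟨hpos, hbs⟩
            · omega
            · rcases Nat.eq_zero_or_pos j with hz | hp
              · exact Or.inl ⟨hz, rfl⟩
              · refine Or.inr ⟨hp, ?_⟩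
                have he : j + 1 - 1 = (j - 1) + 1 := by omega
                rw [he, List.getElem?_cons_succ] at hbs
                exact hbs
      · -- c = '.', esc = false: hmin at 0 gives contradiction
        exfalso
        rcases hmin 0 (by omega) (by simpa using h2.1) with ⟨_, he⟩ | ⟨hpos, _⟩
        · rw [h2.2] at he; exact Bool.false_ne_true he
        · omega
      · rw [ih false k hdot ?_ ?_]
        · have hcne : c ≠ '\\' := h1
          simp [pvConsHead, hcne]
        · rcases Nat.eq_zero_or_pos k with hz | hp
          · exact Or.inl ⟨hz, rfl⟩
          · refine Or.inr ⟨hp, ?_⟩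
            rcases hune with ⟨h0, _⟩ | ⟨_, hne⟩; · omega
            · have he : k + 1 - 1 = (k - 1) + 1 := by omega
              rw [he, List.getElem?_cons_succ] at hne
              exact hne
        · intro j hj hdotj
          rcases hmin (j+1) (by omega) (by simpa using hdotj) with ⟨h0, _⟩ | ⟨hpos, hbs⟩
          · omega
          · rcases Nat.eq_zero_or_pos j with hz | hp
            · subst hz
              simp at hbs
              exact absurd hbs h1
            · refine Or.inr ⟨hp, ?_⟩
              have he : j + 1 - 1 = (j - 1) + 1 := by omega
              rw [he, List.getElem?_cons_succ] at hbs
              exact hbs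

theorem pvPrefix_singleton (a : Char) (u : List Char) : [a] <+: u ↔ u[0]? = some a := by
  constructor
  · intro h; rcases h with ⟨t, ht⟩; subst ht; simp
  · intro h; cases u with
    | nil => simp at h
    | cons x r => simp at h; subst h; exact ⟨r, rfl⟩

-- A's loop computes pvSplitF of the remaining suffix
theorem pvLoopA_eq (s : List Char) : ∀ (fuel i l : Nat) (folders : List (List Char)),
    2 * s.length + 2 ≤ fuel + i + l →
    i ≤ s.length → i ≤ l + 1 → l ≤ s.length →
    (l < s.length ∨ s.length ≤ i) →
    (i < l → s[i]? ≠ some '.') →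
    (∀ j, i + 1 ≤ j → j ≤ l → s[j]? = some '.' → s[j-1]? = some '\\') →
    pvLoopA s fuel (i : Int) (l : Int) folders = folders ++ pvSplitF false (s.drop i) := by
  intro fuel
  induction fuel with
  | zero => intro i l folders hfuel hi hil hln hf hb ha; omega
  | succ f ih =>
    intro i l folders hfuel hi hil hln hf hb ha
    simp only [pvLoopA]
    by_cases hlt : i < s.length
    · rw [if_pos (by exact_mod_cast hlt)]
      rw [PySem.List.pyGet?_natCast]
      by_cases hdot : s[i]? = some '.'
      · -- dot branch
        rw [if_pos hdot]
        have hli : l ≤ i := by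
          by_contra hc
          exact hb (by omega) hdot
        have e1 : (i : Int) + 1 = ((i + 1 : Nat) : Int) := by push_cast; ring
        have e2 : (l : Int) + 1 = ((l + 1 : Nat) : Int) := by push_cast; ring
        rw [e1, e2, ih (i+1) (l+1) (folders ++ [[]]) (by omega) (by omega) (by omega) (by omega)
          (by omega) (by omega) ?_]
        · have hdrop : s.drop i = '.' :: s.drop (i+1) := by
            rw [List.drop_eq_getElem_cons hlt]
            simp only [List.getElem?_eq_getElem hlt, Option.some.injEq] at hdot
            rw [hdot]
          rw [hdrop]
          simp [pvSplitF]
        · intro j hj1 hj2 _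
          omega
      · -- else branch
        rw [if_neg hdot]
        have e2 : (l : Int) + 1 = ((l + 1 : Nat) : Int) := by push_cast; ring
        have hl1 : l + 1 ≤ s.length := by omega
        simp only [e2]
        by_cases hneg : PySem.Chars.findFrom s ['.'] ((l + 1 : Nat) : Int) none = -1
        · rw [if_pos hneg]
          have hnodot : ¬ ['.'] <:+: s.drop (l+1) :=
            (PySem.Chars.findFrom_natCast_eq_neg_one_iff s ['.'] (l+1) hl1).mp hneg
          rw [List.singleton_infix_iff] at hnodot
          rw [PySem.List.slice_natCast s i s.length, pvRepl_filter]
          rw [List.take_of_length_le (by simp)]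
          rw [pvSplitF_no_dot (s.drop i) false ?_]
          · intro j hj
            rw [List.getElem?_drop] at hj
            have hj0 : j ≠ 0 := by
              intro hz; subst hz; simp at hj; exact hdot (by simpa using hj)
            refine Or.inr ⟨by omega, ?_⟩
            rw [List.getElem?_drop]
            by_cases hrange : i + j ≤ l
            · have := ha (i+j) (by omega) hrange hj
              have he : i + (j - 1) = i + j - 1 := by omega
              rw [he]; exact this
            · exfalso
              apply hnodot
              rw [List.mem_iff_getElem?]
              exact ⟨i + j - (l+1), by rw [List.getElem?_drop]; rw [show l + 1 + (i + j - (l+1)) = i + j by omega]; exact hj⟩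
        · rw [if_neg hneg]
          obtain ⟨hge, hpre, hmin⟩ := PySem.Chars.findFrom_natCast_spec s ['.'] (l+1) hl1 hneg
          set loc := PySem.Chars.findFrom s ['.'] ((l+1 : Nat) : Int) none with hloc
          set L := loc.toNat with hL
          have hlocnn : 0 ≤ loc := le_trans (by positivity) hge
          have hlocL : loc = (L : Int) := by omega
          have hdotL : s[L]? = some '.' := by
            have := (pvPrefix_singleton '.' (s.drop L)).mp hpre
            rwa [List.getElem?_drop, Nat.add_zero] at this
          have hLlt : L < s.length := by
            by_contra hc
            rw [List.getElem?_eq_none_iff.mpr (by omega)] at hdotL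
            simp at hdotL
          have hgeL : l + 1 ≤ L := by omega
          have hiL : i < L := by
            rcases Nat.lt_or_ge i L with h | h
            · exact h
            · exfalso
              have : i = L ∨ L < i := by omega
              rcases this with he | hlt2
              · subst he; exact hdot hdotL
              · omega
          have e4 : loc - 1 = ((L - 1 : Nat) : Int) := by omega
          rw [e4, PySem.List.pyGet?_natCast]
          by_cases hesc : s[L-1]? = some '\\'
          · rw [if_pos hesc]
            rw [hlocL, ih i L folders (by omega) (by omega) (by omega) (by omega)
              (by omega) (fun _ => hdot) ?_]
            intro j hj1 hj2 hjdot
            by_cases hjl : j ≤ l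
            · exact ha j hj1 hjl hjdot
            · by_cases hjL : j = L
              · subst hjL; exact hesc
              · exfalso
                have := hmin j (by omega) (by omega)
                rw [pvPrefix_singleton] at this
                rw [List.getElem?_drop] at this
                exact this (by simpa using hjdot)
          · rw [if_neg hesc]
            have e5 : loc + 1 = ((L + 1 : Nat) : Int) := by omega
            rw [e5, hlocL]
            rw [PySem.List.slice_natCast s i L, pvRepl_filter]
            rw [ih (L+1) L _ (by omega) (by omega) (by omega) (by omega) (by omega)
              (by omega) ?_]
            · rw [pvSplitF_split (s.drop i) false (L - i) ?_ ?_ ?_]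
              · rw [List.drop_drop, show i + (L - i + 1) = L + 1 by omega]
                simp
              · rw [List.getElem?_drop, show i + (L - i) = L by omega]; exact hdotL
              · refine Or.inr ⟨by omega, ?_⟩
                rw [List.getElem?_drop, show i + (L - i - 1) = L - 1 by omega]
                exact hesc
              · intro j hj hjdot
                rw [List.getElem?_drop] at hjdot
                have hj0 : j ≠ 0 := by
                  intro hz; subst hz; rw [Nat.add_zero] at hjdot; exact hdot hjdot
                refine Or.inr ⟨by omega, ?_⟩
                rw [List.getElem?_drop, show i + (j - 1) = i + j - 1 by omega]
                by_cases hrange : i + j ≤ l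
                · exact ha (i+j) (by omega) hrange hjdot
                · exfalso
                  have := hmin (i+j) (by omega) (by omega)
                  rw [pvPrefix_singleton, List.getElem?_drop] at this
                  exact this (by simpa using hjdot)
            · intro j hj1 hj2 _; omega
    · rw [if_neg (by exact_mod_cast hlt)]
      have hieq : i = s.length := by omega
      subst hieq
      rw [PySem.List.slice_natCast, pvRepl_filter]
      simp [pvSplitF]

-- ===== VERDICT (by name: the statement is the Claim_ definition above) =====
theorem field_to_folder_list_py_spec : Claim_equal_field_to_folder_list_py := by
  intro field _
  unfold Spec_field_to_folder_list_py field_to_folder_list_py field_to_folder_list_py_alt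
  by_cases h : field = ""
  · simp [h]
  · rw [if_neg h, if_neg h]
    have hne : field.toList ≠ [] := by
      intro hc
      exact h (by simpa using congrArg String.ofList hc)
    have hn : 0 < field.toList.length := List.length_pos_of_ne_nil hne
    rw [pvScanB_eq]
    rw [show (0 : Int) = ((0 : Nat) : Int) from rfl]
    rw [pvLoopA_eq field.toList (2 * field.toList.length + 2) 0 0 [] (by omega) (by omega)
      (by omega) (by omega) (Or.inl hn) (by omega) (by intro j hj1 hj2 _; omega)]
    cases hsp : pvSplitF false field.toList with
    | nil => exact absurd hsp (pvSplitF_ne_nil false field.toList)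
    | cons a b => simp [pvAug, hsp]
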